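-- pv_equiv track=rewrite | github.com/westomopresto/SteamKeyEmailAssigner | main.py | pair_emails_with_steam_keys
-- ===== SOURCE A (Python) =====
-- def pair_emails_with_steam_keys(emails, steam_keys):
--     """Pair each email with a unique Steam key, skipping already claimed emails."""
--     paired_data = []
--     claimed_emails = {email for email in steam_keys.values() if email is not None}
--
--     for email in emails:
--         if email not in claimed_emails:  # Skip if email already has a claimed key
--             for key in steam_keys:
--                 if steam_keys[key] is None:  # Only pair with unclaimed keys
--                     paired_data.append((email, key))
--                     steam_keys[key] = email  # Mark the key as claimed
--                     break  # Move to the next email after claiming a key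
--     return paired_data
-- ===== SOURCE B (Python) =====
-- def pair_emails_with_steam_keys(emails, steam_keys):
--     """Pair each email with a unique Steam key, skipping already claimed emails.
--
--     One pass: precompute the unclaimed keys, then walk the emails once with a
--     pointer into that list (mutates steam_keys the same way as the original).
--     """
--     claimed = {e for e in steam_keys.values() if e is not None}
--     free = [k for k, v in steam_keys.items() if v is None]
--     paired = []
--     i = 0
--     for email in emails:
--         if i == len(free):
--             break
--         if email not in claimed:
--             key = free[i]
--             paired.append((email, key))
--             steam_keys[key] = email
--             i += 1
--     return paired
-- ===== Notes on version B (the rewrite author's own statement) =====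
-- stated objective: faster
-- what changed: B precomputes the list of unclaimed keys once and pairs emails against it with a single advancing pointer, replacing A's rescan of the whole dict for every email.
import Mathlib
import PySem

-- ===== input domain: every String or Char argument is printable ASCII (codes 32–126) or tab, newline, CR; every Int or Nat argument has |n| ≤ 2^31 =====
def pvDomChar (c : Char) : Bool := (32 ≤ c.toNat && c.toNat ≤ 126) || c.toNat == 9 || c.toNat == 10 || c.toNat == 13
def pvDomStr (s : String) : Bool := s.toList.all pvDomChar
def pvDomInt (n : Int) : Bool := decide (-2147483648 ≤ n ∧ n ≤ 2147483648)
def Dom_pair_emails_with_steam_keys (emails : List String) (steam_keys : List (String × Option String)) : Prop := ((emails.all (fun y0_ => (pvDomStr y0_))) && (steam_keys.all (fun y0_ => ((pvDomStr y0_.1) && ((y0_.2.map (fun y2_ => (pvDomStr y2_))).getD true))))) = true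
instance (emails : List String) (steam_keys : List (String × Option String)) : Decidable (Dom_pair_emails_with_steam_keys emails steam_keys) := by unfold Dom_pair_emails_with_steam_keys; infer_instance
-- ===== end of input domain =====

-- B replaces A's per-email rescan of the dict by a precomputed list of unclaimed
-- keys consumed with a pointer (asymptotically faster); both Pythons mutate
-- steam_keys identically, the equivalence proved here is about the return value.


-- ===== PORT A =====
-- dict lookup: first match (a Python dict has unique keys)
def pvGetA : List (String × Option String) → String → Option (Option String)
  | [], _ => none
  | (k, v) :: rest, x => if k == x then some v else pvGetA rest x

-- steam_keys[key] = email : overwrite the (first) entry for key in place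
def pvSetA : List (String × Option String) → String → Option String → List (String × Option String)
  | [], _, _ => []
  | (k, v) :: rest, x, w => if k == x then (k, w) :: rest else (k, v) :: pvSetA rest x w

-- 'for key in steam_keys: if steam_keys[key] is None: … ; break'
def aInner (email : String) : List String → List (String × Option String) → List (String × Option String) × Option String
  | [], d => (d, none)
  | k :: ks, d =>
      match pvGetA d k with
      | some none => (pvSetA d k (some email), some k)
      | _ => aInner email ks d

def pair_emails_with_steam_keys (emails : List String) (steam_keys : List (String × Option String)) : List (String × String) :=
  let claimed : PySem.Set String := PySem.Set.ofList (steam_keys.filterMap (·.2))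
  (emails.foldl (fun st email =>
      if claimed.contains email then st
      else
        match aInner email (st.1.map (·.1)) st.1 with
        | (d', some k) => (d', st.2 ++ [(email, k)])
        | (d', none) => (d', st.2))
    (steam_keys, ([] : List (String × String)))).2

-- ===== PORT B =====
-- free = [k for k, v in steam_keys.items() if v is None]
def freeKeysB (steam_keys : List (String × Option String)) : List String :=
  steam_keys.filterMap (fun p => if p.2 = none then some p.1 else none)

-- the email loop with the pointer into 'free' (the consumed prefix is the pointer)
def bLoop (claimed : PySem.Set String) : List String → List String → List (String × String)
  | _, [] => []            -- i == len(free): break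
  | [], _ :: _ => []
  | e :: es, k :: ks =>
      if claimed.contains e then bLoop claimed es (k :: ks)
      else (e, k) :: bLoop claimed es ks

def pair_emails_with_steam_keys_alt (emails : List String) (steam_keys : List (String × Option String)) : List (String × String) :=
  bLoop (PySem.Set.ofList (steam_keys.filterMap (·.2))) emails (freeKeysB steam_keys)

-- ===== PRECONDITION & SPEC =====
-- Pre_ excludes association lists with duplicate keys: a Python dict cannot
-- contain them, so no Python input is excluded.
def Pre_pair_emails_with_steam_keys (emails : List String) (steam_keys : List (String × Option String)) : Prop :=
  (steam_keys.map Prod.fst).Nodup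
instance (emails : List String) (steam_keys : List (String × Option String)) : Decidable (Pre_pair_emails_with_steam_keys emails steam_keys) := by unfold Pre_pair_emails_with_steam_keys; infer_instance

def pvWitness_pair_emails_with_steam_keys : List String × (List (String × Option String)) :=
  (["a", "b"], [("k1", none), ("k2", some "b")])

def Spec_pair_emails_with_steam_keys (emails : List String) (steam_keys : List (String × Option String)) (out : List (String × String)) : Prop := out = pair_emails_with_steam_keys_alt emails steam_keys
instance (emails : List String) (steam_keys : List (String × Option String)) (out : List (String × String)) : Decidable (Spec_pair_emails_with_steam_keys emails steam_keys out) := by unfold Spec_pair_emails_with_steam_keys; infer_instance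

-- ===== CLAIM (what is proved, stated in full; the proofs are below) =====
def Claim_equal_pair_emails_with_steam_keys : Prop := ∀ (emails : List String) (steam_keys : List (String × Option String)), Dom_pair_emails_with_steam_keys emails steam_keys → Pre_pair_emails_with_steam_keys emails steam_keys → Spec_pair_emails_with_steam_keys emails steam_keys (pair_emails_with_steam_keys emails steam_keys)

-- ===== LEMMAS AND PROOFS =====

-- replace the first unclaimed entry (what A's inner loop does under unique keys)
def markFirst (email : String) : List (String × Option String) → List (String × Option String)
  | [] => []
  | (k, none) :: rest => (k, some email) :: rest
  | (k, some v) :: rest => (k, some v) :: markFirst email rest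

theorem aInner_skip (email k0 : String) (v0 : Option String)
    (ks : List String) (d : List (String × Option String)) (h : ∀ k ∈ ks, k ≠ k0) :
    aInner email ks ((k0, v0) :: d) = (((k0, v0) :: (aInner email ks d).1), (aInner email ks d).2) := by
  induction ks generalizing d with
  | nil => simp [aInner]
  | cons k ks ih =>
      have hk : k ≠ k0 := h k (by simp)
      have hb : (k0 == k) = false := by
        simp [beq_eq_false_iff_ne]; exact fun he => hk he.symm
      simp only [aInner, pvGetA, pvSetA, hb, if_false, Bool.false_eq_true]
      cases hg : pvGetA d k with
      | none => exact ih d (fun x hx => h x (by simp [hx]))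
      | some v =>
          cases v with
          | none => simp
          | some _ => exact ih d (fun x hx => h x (by simp [hx]))

theorem aInner_spec (email : String) (d : List (String × Option String))
    (h : (d.map Prod.fst).Nodup) :
    aInner email (d.map Prod.fst) d =
      match freeKeysB d with
      | [] => (d, none)
      | k :: _ => (markFirst email d, some k) := by
  induction d with
  | nil => simp [aInner, freeKeysB]
  | cons p rest ih =>
      obtain ⟨k0, v0⟩ := p
      simp only [List.map_cons, List.nodup_cons, List.mem_map] at h
      cases v0 with
      | none =>
          simp [aInner, pvGetA, pvSetA, freeKeysB, markFirst]
      | some v =>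
          have hnk : ∀ k ∈ rest.map Prod.fst, k ≠ k0 := by
            intro k hk he
            rcases List.mem_map.1 hk with ⟨a, ha, rfl⟩
            exact h.1 ⟨a, ha, he⟩
          simp only [List.map_cons, aInner, pvGetA, beq_self_eq_true, if_true]
          rw [aInner_skip email k0 (some v) _ rest hnk, ih h.2]
          have hred : freeKeysB ((k0, some v) :: rest) = freeKeysB rest := by
            simp [freeKeysB]
          rw [hred]
          cases hf : freeKeysB rest with
          | nil => simp [hf]
          | cons k ks => simp [markFirst]

theorem freeKeysB_markFirst (email : String) (d : List (String × Option String)) :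
    freeKeysB (markFirst email d) = (freeKeysB d).tail := by
  induction d with
  | nil => simp [markFirst, freeKeysB]
  | cons p rest ih =>
      obtain ⟨k, v⟩ := p
      cases v with
      | none => simp [markFirst, freeKeysB]
      | some v => simpa [markFirst, freeKeysB] using ih

theorem keys_markFirst (email : String) (d : List (String × Option String)) :
    (markFirst email d).map Prod.fst = d.map Prod.fst := by
  induction d with
  | nil => rfl
  | cons p rest ih =>
      obtain ⟨k, v⟩ := p
      cases v with
      | none => simp [markFirst]
      | some v => simp [markFirst, ih]

theorem bLoop_free_nil (c : PySem.Set String) (es : List String) :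
    bLoop c es [] = [] := by
  cases es <;> rfl

theorem bLoop_cons_cons (c : PySem.Set String) (e k : String) (es ks : List String) :
    bLoop c (e :: es) (k :: ks) =
      if c.contains e then bLoop c es (k :: ks) else (e, k) :: bLoop c es ks := rfl

theorem main_loop (c : PySem.Set String) (es : List String) :
    ∀ (d : List (String × Option String)) (acc : List (String × String)),
    (d.map Prod.fst).Nodup →
    (es.foldl (fun st email =>
        if c.contains email then st
        else
          match aInner email (st.1.map (·.1)) st.1 with
          | (d', some k) => (d', st.2 ++ [(email, k)])
          | (d', none) => (d', st.2))
      (d, acc)).2 = acc ++ bLoop c es (freeKeysB d) := by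
  induction es with
  | nil =>
      intro d acc _
      cases freeKeysB d <;> simp [bLoop]
  | cons e es ih =>
      intro d acc hnd
      simp only [List.foldl_cons]
      by_cases hc : c.contains e
      · rw [if_pos hc]
        rw [ih d acc hnd]
        cases hf : freeKeysB d with
        | nil => simp [bLoop_free_nil]
        | cons k ks =>
            rw [bLoop_cons_cons, if_pos hc]
      · rw [if_neg hc]
        rw [aInner_spec e d hnd]
        cases hf : freeKeysB d with
        | nil =>
            rw [ih d acc hnd, hf]
            simp [bLoop_free_nil]
        | cons k ks =>
            have hnd' : ((markFirst e d).map Prod.fst).Nodup := by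
              rw [keys_markFirst]; exact hnd
            rw [ih (markFirst e d) (acc ++ [(e, k)]) hnd']
            rw [freeKeysB_markFirst, hf, bLoop_cons_cons, if_neg hc]
            simp

-- ===== VERDICT (by name: the statement is the Claim_ definition above) =====
theorem pair_emails_with_steam_keys_spec : Claim_equal_pair_emails_with_steam_keys := by
  intro emails steam_keys _dom hpre
  unfold Spec_pair_emails_with_steam_keys pair_emails_with_steam_keys pair_emails_with_steam_keys_alt
  simpa [freeKeysB] using main_loop (PySem.Set.ofList (steam_keys.filterMap (·.2))) emails steam_keys [] hpre
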